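-- pv_equiv track=rewrite | github.com/qienhuang/F-I-T | experiments/real_world/afdb_swissprot_tier2p11_confidence_regimes/src/io_coords.py | _parse_mmcif_atom_site
-- ===== SOURCE A (Python) =====
-- from typing import Dict, List, Tuple
--
-- def _tokenize_cif_value(tok: str) -> str:
--     if (tok.startswith("'") and tok.endswith("'")) or (tok.startswith('"') and tok.endswith('"')):
--         return tok[1:-1]
--     return tok
--
-- def _parse_mmcif_atom_site(lines: List[str]) -> Tuple[List[str], List[List[str]]]:
--     # Minimal mmCIF loop parser for AFDB coordinate files.
--     # Finds a loop_ with _atom_site.* keys, then reads row tokens.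
--     keys: List[str] = []
--     rows: List[List[str]] = []
--     i = 0
--     n = len(lines)
--     while i < n:
--         if lines[i].strip() == "loop_":
--             j = i + 1
--             klist: List[str] = []
--             while j < n and lines[j].lstrip().startswith("_atom_site."):
--                 klist.append(lines[j].strip())
--                 j += 1
--             if not klist:
--                 i += 1
--                 continue
--             keys = klist
--             cur_tokens: List[str] = []
--             while j < n:
--                 line = lines[j].strip()
--                 if not line:
--                     j += 1
--                     continue
--                 if line == "loop_" or (line.startswith("_") and not cur_tokens):
--                     break
--                 toks = [_tokenize_cif_value(t) for t in line.split()]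
--                 cur_tokens.extend(toks)
--                 while len(cur_tokens) >= len(keys):
--                     row = cur_tokens[:len(keys)]
--                     rows.append(row)
--                     cur_tokens = cur_tokens[len(keys):]
--                 j += 1
--             return keys, rows
--         i += 1
--     return [], []
-- ===== SOURCE B (Python) =====
-- from typing import List, Tuple
--
-- def _tokenize_cif_value(tok: str) -> str:
--     if (tok.startswith("'") and tok.endswith("'")) or (tok.startswith('"') and tok.endswith('"')):
--         return tok[1:-1]
--     return tok
--
-- def _parse_mmcif_atom_site(lines: List[str]) -> Tuple[List[str], List[List[str]]]:
--     # Two-pass variant: pass one collects all data tokens into one flat list,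
--     # pass two slices it into rows of len(keys); trailing partial row dropped.
--     i = 0
--     n = len(lines)
--     while i < n:
--         if lines[i].strip() == "loop_":
--             j = i + 1
--             klist: List[str] = []
--             while j < n and lines[j].lstrip().startswith("_atom_site."):
--                 klist.append(lines[j].strip())
--                 j += 1
--             if not klist:
--                 i += 1
--                 continue
--             k = len(klist)
--             flat: List[str] = []
--             while j < n:
--                 line = lines[j].strip()
--                 if not line:
--                     j += 1
--                     continue
--                 if line == "loop_" or (line.startswith("_") and len(flat) % k == 0):
--                     break
--                 flat.extend(_tokenize_cif_value(t) for t in line.split())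
--                 j += 1
--             nrows = len(flat) // k
--             rows = [flat[r * k:(r + 1) * k] for r in range(nrows)]
--             return klist, rows
--         i += 1
--     return [], []
-- ===== Notes on version B (the rewrite author's own statement) =====
-- stated objective: alternative
-- what changed: A builds rows inline with a stateful chunk-as-you-go loop (cur_tokens carried across lines); B first collects all data tokens into one flat list (breaking on a '_'-line only when the running token count is a multiple of len(keys)) and then slices the flat list into len(keys)-sized rows, dropping any trailing partial row.
import Mathlib
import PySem

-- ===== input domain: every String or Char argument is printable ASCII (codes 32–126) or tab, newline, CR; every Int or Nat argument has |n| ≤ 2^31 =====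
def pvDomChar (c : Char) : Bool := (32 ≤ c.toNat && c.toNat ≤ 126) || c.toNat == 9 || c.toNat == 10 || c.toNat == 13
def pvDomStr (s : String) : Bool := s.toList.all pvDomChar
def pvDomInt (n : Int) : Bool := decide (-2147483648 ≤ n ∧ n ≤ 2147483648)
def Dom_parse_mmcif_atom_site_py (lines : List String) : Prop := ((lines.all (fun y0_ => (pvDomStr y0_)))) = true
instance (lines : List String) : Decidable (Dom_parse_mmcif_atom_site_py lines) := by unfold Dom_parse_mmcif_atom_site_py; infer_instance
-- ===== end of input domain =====

-- B replaces A's inline chunk-as-you-go row building by two passes (one flat token list,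
-- then slice it into len(keys)-sized rows); same return value, objective: alternative decomposition.

-- ===== PORT A =====

-- _tokenize_cif_value (helper of both Pythons)
def pvTok (tok : String) : String :=
  if (PySem.Str.startswith tok "'" && PySem.Str.endswith tok "'")
      || (PySem.Str.startswith tok "\"" && PySem.Str.endswith tok "\"") then
    PySem.Str.slice tok (some 1) (some (-1))     -- tok[1:-1]
  else tok

-- the key-collecting inner while loop (textually identical in both Pythons):
-- returns (klist, remaining lines after the keys)
def pvCollectKeys : List String → List String × List String
  | [] => ([], [])
  | l :: rest =>
    if PySem.Str.startswith (PySem.Str.lstrip l) "_atom_site." then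
      (PySem.Str.strip l :: (pvCollectKeys rest).1, (pvCollectKeys rest).2)
    else ([], l :: rest)

-- A's inner 'while len(cur_tokens) >= len(keys)' chunking loop
def pvChunkStep (k : Nat) (rows : List (List String)) (cur : List String) :
    List (List String) × List String :=
  if _h : 0 < k ∧ k ≤ cur.length then
    pvChunkStep k (rows ++ [cur.take k]) (cur.drop k)
  else (rows, cur)
termination_by cur.length
decreasing_by simp only [List.length_drop]; omega

-- A's row-reading while loop over the remaining lines, state (rows, cur_tokens)
def pvRowsA (k : Nat) : List String → List (List String) → List String → List (List String)
  | [], rows, _ => rows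
  | l :: rest, rows, cur =>
    if PySem.Str.strip l = "" then pvRowsA k rest rows cur
    else if PySem.Str.strip l = "loop_" ∨
        (PySem.Str.startswith (PySem.Str.strip l) "_" = true ∧ cur = []) then rows
    else
      pvRowsA k rest
        (pvChunkStep k rows (cur ++ (PySem.Str.split₀ (PySem.Str.strip l)).map pvTok)).1
        (pvChunkStep k rows (cur ++ (PySem.Str.split₀ (PySem.Str.strip l)).map pvTok)).2

def parse_mmcif_atom_site_py : List String → List String × List (List String)
  | [] => ([], [])
  | l :: rest =>
    if PySem.Str.strip l = "loop_" then
      if (pvCollectKeys rest).1 = [] then parse_mmcif_atom_site_py rest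
      else ((pvCollectKeys rest).1,
            pvRowsA (pvCollectKeys rest).1.length (pvCollectKeys rest).2 [] [])
    else parse_mmcif_atom_site_py rest

-- ===== PORT B =====

-- B's pass one: append all data tokens to one flat list
-- (break on a '_'-line only when len(flat) % k == 0, i.e. no partial row pending)
def pvFlatB (k : Nat) : List String → List String → List String
  | [], flat => flat
  | l :: rest, flat =>
    if PySem.Str.strip l = "" then pvFlatB k rest flat
    else if PySem.Str.strip l = "loop_" ∨
        (PySem.Str.startswith (PySem.Str.strip l) "_" = true ∧ flat.length % k = 0) then flat
    else pvFlatB k rest (flat ++ (PySem.Str.split₀ (PySem.Str.strip l)).map pvTok)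

-- B's pass two: rows = [flat[r*k:(r+1)*k] for r in range(len(flat)//k)]
def pvSliceRows (k : Nat) (flat : List String) : List (List String) :=
  (PySem.List.pyRange 0 (PySem.Int.floordiv (flat.length : Int) (k : Int))).map
    (fun r => PySem.List.slice flat (some (r * (k : Int))) (some ((r + 1) * (k : Int))))

def parse_mmcif_atom_site_py_alt : List String → List String × List (List String)
  | [] => ([], [])
  | l :: rest =>
    if PySem.Str.strip l = "loop_" then
      if (pvCollectKeys rest).1 = [] then parse_mmcif_atom_site_py_alt rest
      else ((pvCollectKeys rest).1,
            pvSliceRows (pvCollectKeys rest).1.length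
              (pvFlatB (pvCollectKeys rest).1.length (pvCollectKeys rest).2 []))
    else parse_mmcif_atom_site_py_alt rest

-- ===== PRECONDITION & SPEC =====
def Spec_parse_mmcif_atom_site_py (lines : List String) (out : List String × List (List String)) : Prop := out = parse_mmcif_atom_site_py_alt lines
instance (lines : List String) (out : List String × List (List String)) : Decidable (Spec_parse_mmcif_atom_site_py lines out) := by unfold Spec_parse_mmcif_atom_site_py; infer_instance

-- ===== CLAIM (what is proved, stated in full; the proofs are below) =====
def Claim_equal_parse_mmcif_atom_site_py : Prop := ∀ (lines : List String), Dom_parse_mmcif_atom_site_py lines → Spec_parse_mmcif_atom_site_py lines (parse_mmcif_atom_site_py lines)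

-- ===== LEMMAS AND PROOFS =====

-- reference chunking: the complete k-sized groups of l, in order
def pvChunksRec (k : Nat) (l : List String) : List (List String) :=
  if _h : 0 < k ∧ k ≤ l.length then l.take k :: pvChunksRec k (l.drop k) else []
termination_by l.length
decreasing_by simp only [List.length_drop]; omega

lemma pvChunksRec_of_lt {k : Nat} {l : List String} (h : l.length < k) :
    pvChunksRec k l = [] := by
  rw [pvChunksRec, dif_neg (show ¬(0 < k ∧ k ≤ l.length) by omega)]

lemma pvChunksRec_of_le {k : Nat} {l : List String} (hk : 0 < k) (h : k ≤ l.length) :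
    pvChunksRec k l = l.take k :: pvChunksRec k (l.drop k) := by
  rw [pvChunksRec, dif_pos (show 0 < k ∧ k ≤ l.length from ⟨hk, h⟩)]

lemma pv_div_succ {k m : Nat} (hk : 0 < k) (h : k ≤ m) : m / k = (m - k) / k + 1 := by
  rw [Nat.div_eq]; simp [hk, h]

-- A's chunk loop = append the complete groups, keep the remainder
lemma pvChunkStep_spec (k : Nat) (hk : 0 < k) :
    ∀ (n : Nat) (cur : List String), cur.length ≤ n → ∀ rows,
      pvChunkStep k rows cur = (rows ++ pvChunksRec k cur, cur.drop (cur.length / k * k)) := by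
  intro n
  induction n with
  | zero =>
    intro cur hn rows
    have hlt : cur.length < k := by omega
    rw [pvChunkStep, dif_neg (show ¬(0 < k ∧ k ≤ cur.length) by omega),
      pvChunksRec_of_lt hlt, Nat.div_eq_of_lt hlt]
    simp
  | succ n ih =>
    intro cur hn rows
    by_cases h : k ≤ cur.length
    · rw [pvChunkStep, dif_pos (show 0 < k ∧ k ≤ cur.length from ⟨hk, h⟩)]
      rw [ih (cur.drop k) (by simp only [List.length_drop]; omega)]
      have hdiv : cur.length / k = (cur.length - k) / k + 1 := pv_div_succ hk h
      simp only [Prod.mk.injEq]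
      refine ⟨?_, ?_⟩
      · rw [pvChunksRec_of_le hk h]
        simp [List.append_assoc]
      · rw [List.drop_drop, List.length_drop, hdiv]
        congr 1
        ring
    · rw [pvChunkStep, dif_neg (show ¬(0 < k ∧ k ≤ cur.length) by omega),
        pvChunksRec_of_lt (by omega), Nat.div_eq_of_lt (by omega)]
      simp

-- a prefix whose length is a multiple of k passes through B's flat loop untouched
lemma pvFlatB_shift (k : Nat) (p : List String) (hp : p.length % k = 0) :
    ∀ (rest : List String) (cur : List String),
      pvFlatB k rest (p ++ cur) = p ++ pvFlatB k rest cur := by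
  intro rest
  induction rest with
  | nil => intro cur; rfl
  | cons l rest ih =>
    intro cur
    obtain ⟨m, hm⟩ := Nat.dvd_of_mod_eq_zero hp
    have hmod : (p ++ cur).length % k = cur.length % k := by
      rw [List.length_append, hm]
      exact Nat.mul_add_mod k m cur.length
    rw [pvFlatB, pvFlatB]
    simp only [hmod]
    split_ifs with h1 h2
    · exact ih cur
    · rfl
    · rw [List.append_assoc]
      exact ih _

-- chunking (complete-groups prefix of l) ++ X = chunks of l, then chunks of X
lemma pvChunksRec_take_append (k : Nat) (hk : 0 < k) :
    ∀ (n : Nat) (l : List String), l.length ≤ n → ∀ (X : List String),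
      pvChunksRec k (l.take (l.length / k * k) ++ X) = pvChunksRec k l ++ pvChunksRec k X := by
  intro n
  induction n with
  | zero =>
    intro l hn X
    have hl : l = [] := List.length_eq_zero_iff.mp (by omega)
    subst hl
    rw [pvChunksRec_of_lt (show ([] : List String).length < k by simpa using hk)]
    simp
  | succ n ih =>
    intro l hn X
    by_cases h : k ≤ l.length
    · have hsplit : l.length / k * k = k + (l.length - k) / k * k := by
        rw [pv_div_succ hk h]; ring
      rw [hsplit, List.take_add, List.append_assoc]
      have hktake : (l.take k).length = k := by simp [h]
      have hcond : k ≤ (l.take k ++ ((l.drop k).take ((l.length - k) / k * k) ++ X)).length := by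
        simp only [List.length_append, hktake]; omega
      rw [pvChunksRec_of_le hk hcond,
        List.take_append_of_le_length (le_of_eq hktake.symm),
        List.drop_append_of_le_length (le_of_eq hktake.symm)]
      have hIH := ih (l.drop k) (by simp only [List.length_drop]; omega) X
      simp only [List.length_drop] at hIH
      rw [pvChunksRec_of_le hk h]
      simp [List.take_take, hIH]
    · have h0 : l.length / k = 0 := Nat.div_eq_of_lt (by omega)
      rw [h0]
      simp only [Nat.zero_mul, List.take_zero, List.nil_append]
      rw [pvChunksRec_of_lt (show l.length < k by omega)]
      simp

-- main invariant: A's row loop = chunks of B's flat list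
lemma pvRowsA_eq (k : Nat) (hk : 0 < k) :
    ∀ (rest : List String) (cur : List String) (rows : List (List String)),
      cur.length < k →
      pvRowsA k rest rows cur = rows ++ pvChunksRec k (pvFlatB k rest cur) := by
  intro rest
  induction rest with
  | nil =>
    intro cur rows hcur
    simp [pvRowsA, pvFlatB, pvChunksRec_of_lt hcur]
  | cons l rest ih =>
    intro cur rows hcur
    rw [pvRowsA, pvFlatB]
    have hcm : cur.length % k = cur.length := Nat.mod_eq_of_lt hcur
    by_cases h1 : PySem.Str.strip l = ""
    · simp only [if_pos h1]
      exact ih cur rows hcur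
    · simp only [if_neg h1]
      have hiff : (PySem.Str.strip l = "loop_" ∨
            (PySem.Str.startswith (PySem.Str.strip l) "_" = true ∧ cur = [])) ↔
          (PySem.Str.strip l = "loop_" ∨
            (PySem.Str.startswith (PySem.Str.strip l) "_" = true ∧ cur.length % k = 0)) := by
        rw [hcm]
        constructor
        · rintro (h | ⟨hs, hc⟩)
          · exact Or.inl h
          · exact Or.inr ⟨hs, by simp [hc]⟩
        · rintro (h | ⟨hs, hc⟩)
          · exact Or.inl h
          · exact Or.inr ⟨hs, List.length_eq_zero_iff.mp hc⟩
      by_cases h2 : PySem.Str.strip l = "loop_" ∨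
          (PySem.Str.startswith (PySem.Str.strip l) "_" = true ∧ cur = [])
      · rw [if_pos h2, if_pos (hiff.mp h2), pvChunksRec_of_lt hcur]
        simp
      · rw [if_neg h2, if_neg (fun hh => h2 (hiff.mpr hh))]
        set c := cur ++ (PySem.Str.split₀ (PySem.Str.strip l)).map pvTok with hc
        rw [pvChunkStep_spec k hk c.length c (le_refl _) rows]
        have hdm : k * (c.length / k) + c.length % k = c.length := Nat.div_add_mod c.length k
        have hmc : c.length / k * k = k * (c.length / k) := Nat.mul_comm _ _
        have hremlen : (c.drop (c.length / k * k)).length = c.length % k := by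
          simp only [List.length_drop]; omega
        have hrem : (c.drop (c.length / k * k)).length < k := by
          rw [hremlen]; exact Nat.mod_lt _ hk
        rw [ih _ _ hrem]
        have hp : (c.take (c.length / k * k)).length % k = 0 := by
          have hle : k * (c.length / k) ≤ c.length := by omega
          simp only [List.length_take, hmc, Nat.min_eq_left hle, Nat.mul_mod_right]
        calc rows ++ pvChunksRec k c ++ pvChunksRec k (pvFlatB k rest (c.drop (c.length / k * k)))
            = rows ++ (pvChunksRec k c ++ pvChunksRec k (pvFlatB k rest (c.drop (c.length / k * k)))) := by
              simp [List.append_assoc]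
          _ = rows ++ pvChunksRec k (c.take (c.length / k * k) ++ pvFlatB k rest (c.drop (c.length / k * k))) := by
              rw [pvChunksRec_take_append k hk c.length c (le_refl _)]
          _ = rows ++ pvChunksRec k (pvFlatB k rest (c.take (c.length / k * k) ++ c.drop (c.length / k * k))) := by
              rw [pvFlatB_shift k _ hp]
          _ = rows ++ pvChunksRec k (pvFlatB k rest c) := by rw [List.take_append_drop]

-- the r-th slice of the comprehension is the r-th k-sized group
lemma pvSlice_group (k : Nat) (flat : List String) (r : Nat) :
    PySem.List.slice flat (some ((r : Int) * (k : Int))) (some (((r : Int) + 1) * (k : Int)))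
      = (flat.drop (r * k)).take k := by
  have h1 : (r : Int) * (k : Int) = ((r * k : Nat) : Int) := by push_cast; ring
  have h2 : ((r : Int) + 1) * (k : Int) = ((r * k : Nat) : Int) + ((k : Nat) : Int) := by
    push_cast; ring
  rw [h1, h2, PySem.List.slice_natCast_add]

-- the comprehension over range(len//k) of the k-sized groups = the reference chunking
lemma pvChunks_formula (k : Nat) (hk : 0 < k) :
    ∀ (n : Nat) (flat : List String), flat.length ≤ n →
      (List.range (flat.length / k)).map (fun r : Nat => (flat.drop (r * k)).take k)
        = pvChunksRec k flat := by
  intro n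
  induction n with
  | zero =>
    intro flat hn
    have h0 : flat.length / k = 0 := Nat.div_eq_of_lt (by omega)
    rw [h0, pvChunksRec_of_lt (by omega)]
    simp
  | succ n ih =>
    intro flat hn
    by_cases h : k ≤ flat.length
    · rw [pv_div_succ hk h, List.range_succ_eq_map, List.map_cons, List.map_map,
        pvChunksRec_of_le hk h]
      congr 1
      · simp
      · have hIH := ih (flat.drop k) (by simp only [List.length_drop]; omega)
        simp only [List.length_drop] at hIH
        rw [← hIH]
        apply List.map_congr_left
        intro r _
        simp only [Function.comp_apply, List.drop_drop]
        congr 2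
        · simp [Nat.succ_mul]
          omega
    · have h0 : flat.length / k = 0 := Nat.div_eq_of_lt (by omega)
      rw [h0, pvChunksRec_of_lt (by omega)]
      simp

-- B's pass two = the reference chunking
lemma pvSliceRows_eq (k : Nat) (hk : 0 < k) (flat : List String) :
    pvSliceRows k flat = pvChunksRec k flat := by
  unfold pvSliceRows
  rw [PySem.Int.floordiv_natCast, PySem.List.pyRange_zero_natCast, List.map_map]
  rw [← pvChunks_formula k hk flat.length flat (le_refl _)]
  apply List.map_congr_left
  intro r _
  simp only [Function.comp_apply]
  exact pvSlice_group k flat r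

lemma pv_main : ∀ lines, parse_mmcif_atom_site_py lines = parse_mmcif_atom_site_py_alt lines := by
  intro lines
  induction lines with
  | nil => rfl
  | cons l rest ih =>
    rw [parse_mmcif_atom_site_py, parse_mmcif_atom_site_py_alt]
    by_cases h1 : PySem.Str.strip l = "loop_"
    · simp only [if_pos h1]
      by_cases h2 : (pvCollectKeys rest).1 = []
      · simp only [if_pos h2]; exact ih
      · simp only [if_neg h2]
        have hk : 0 < (pvCollectKeys rest).1.length := List.length_pos_iff.mpr h2
        rw [pvRowsA_eq _ hk _ [] [] (by simpa using hk)]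
        rw [pvSliceRows_eq _ hk]
        simp
    · simp only [if_neg h1]; exact ih

-- ===== VERDICT (by name: the statement is the Claim_ definition above) =====
theorem parse_mmcif_atom_site_py_spec : Claim_equal_parse_mmcif_atom_site_py := by
  intro lines _
  unfold Spec_parse_mmcif_atom_site_py
  exact pv_main lines
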